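-- pv_equiv track=rewrite | github.com/arrested-dev/2048 | game_rules.py | points_left
-- ===== SOURCE A (Python) =====
-- def points_left(grid):
--     def count_occurences(_array, count):
--         c = 0
--         for i in _array:
--             if count == i:
--                 c += 1
--         return c
--
--     points = 0
--     for i in range(len(grid)):
--         buffer = []
--         for j in range(0, len(grid[i])):
--             if grid[i][j] != 0:
--                 buffer.append(grid[i][j])
--         while 1:
--             c  = 0
--             for k in range(1, len(buffer)):
--                 if buffer[k-1] == buffer[k]:
--                     c += 1
--                     points += (buffer[k-1] + buffer[k])
--                     del buffer[k-1]
--                     del buffer[k-1]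
--                     break
--             if c ==0:
--                 break
--     return points
-- ===== SOURCE B (Python) =====
-- def points_left(grid):
--     total = 0
--     for row in grid:
--         stack = []
--         for x in row:
--             if x == 0:
--                 continue
--             if stack and stack[-1] == x:
--                 stack.pop()
--                 total += 2 * x
--             else:
--                 stack.append(x)
--     return total
-- ===== Notes on version B (the rewrite author's own statement) =====
-- stated objective: faster
-- what changed: Replaced A's repeated rescan-from-start merge loop (find first adjacent equal pair, delete both, restart) with a single left-to-right pass per row that keeps a stack of unmerged tiles, popping and scoring when the new tile equals the top.
import Mathlib
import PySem

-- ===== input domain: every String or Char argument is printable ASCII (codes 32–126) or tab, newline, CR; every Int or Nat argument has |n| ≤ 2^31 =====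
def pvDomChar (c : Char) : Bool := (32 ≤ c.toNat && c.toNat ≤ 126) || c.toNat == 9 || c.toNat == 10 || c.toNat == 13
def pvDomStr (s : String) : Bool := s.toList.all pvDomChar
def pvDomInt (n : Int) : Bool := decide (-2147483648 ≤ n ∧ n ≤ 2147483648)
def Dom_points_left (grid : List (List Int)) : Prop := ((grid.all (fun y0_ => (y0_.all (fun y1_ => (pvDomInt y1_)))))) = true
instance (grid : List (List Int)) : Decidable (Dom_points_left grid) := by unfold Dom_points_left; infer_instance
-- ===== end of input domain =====

-- B replaces A's repeated rescan-and-restart merge loop with a single stack pass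
-- per row (objective: faster, one pass instead of a quadratic rescan); same value.

-- ===== PORT A =====
-- A's inner 'for k in range(1, len(buffer))' scan: find the FIRST adjacent equal
-- pair, return the points it adds and the buffer with both elements deleted
-- (none = no pair found, i.e. the inner loop ends with c == 0).
def pvScanPair : List Int → Option (Int × List Int)
  | a :: b :: rest =>
    if a == b then some (a + b, rest)
    else (pvScanPair (b :: rest)).map (fun pr => (pr.1, a :: pr.2))
  | _ => none

theorem pvScanPair_length {l : List Int} {p : Int} {l' : List Int}
    (h : pvScanPair l = some (p, l')) : l'.length < l.length := by
  induction l generalizing p l' with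
  | nil => simp [pvScanPair] at h
  | cons a t ih =>
    match t with
    | [] => simp [pvScanPair] at h
    | b :: rest =>
      simp only [pvScanPair] at h
      split at h
      · obtain ⟨h1, h2⟩ := by simpa using h
        subst h2; simp
      · cases hb : pvScanPair (b :: rest) with
        | none => rw [hb] at h; simp at h
        | some pr =>
          rw [hb] at h
          obtain ⟨h1, h2⟩ := by simpa using h
          have hlt := ih (p := pr.1) (l' := pr.2) (by rw [hb])
          subst h2
          simp at hlt ⊢
          omega

-- A's 'while 1' loop: repeat the scan until no adjacent equal pair remains.
def pvWhileMerge (buffer : List Int) (points : Int) : Int :=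
  match h : pvScanPair buffer with
  | some pr => pvWhileMerge pr.2 (points + pr.1)
  | none => points
termination_by buffer.length
decreasing_by exact pvScanPair_length h

def points_left (grid : List (List Int)) : Int :=
  grid.foldl (fun points row => pvWhileMerge (row.filter (fun x => x != 0)) points) 0

-- ===== PORT B =====
-- B's per-row single pass: stack of unmerged tiles (list head = Python's stack[-1]).
def pvStackRow (stack : List Int) (xs : List Int) (total : Int) : Int :=
  match xs with
  | [] => total
  | x :: rest =>
    if x == 0 then pvStackRow stack rest total
    else
      match stack with
      | t :: s => if t == x then pvStackRow s rest (total + 2 * x)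
                  else pvStackRow (x :: t :: s) rest total
      | [] => pvStackRow [x] rest total

def points_left_alt (grid : List (List Int)) : Int :=
  grid.foldl (fun total row => pvStackRow [] row total) 0

-- ===== PRECONDITION & SPEC =====
def Spec_points_left (grid : List (List Int)) (out : Int) : Prop := out = points_left_alt grid
instance (grid : List (List Int)) (out : Int) : Decidable (Spec_points_left grid out) := by unfold Spec_points_left; infer_instance

-- ===== CLAIM (what is proved, stated in full; the proofs are below) =====
def Claim_equal_points_left : Prop := ∀ (grid : List (List Int)), Dom_points_left grid → Spec_points_left grid (points_left grid)

-- ===== LEMMAS AND PROOFS =====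

theorem pvWhileMerge_none {buffer : List Int} (h : pvScanPair buffer = none)
    (pts : Int) : pvWhileMerge buffer pts = pts := by
  rw [pvWhileMerge]
  split
  · simp_all
  · rfl

theorem pvWhileMerge_some {buffer : List Int} {p : Int} {l' : List Int}
    (h : pvScanPair buffer = some (p, l')) (pts : Int) :
    pvWhileMerge buffer pts = pvWhileMerge l' (pts + p) := by
  rw [pvWhileMerge]
  split
  · rename_i pr hpr
    rw [h] at hpr
    obtain ⟨h1, h2⟩ : p = pr.1 ∧ l' = pr.2 := by
      cases pr; simpa using hpr
    rw [h1, h2]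
  · rename_i hn
    rw [h] at hn
    simp at hn

-- if no two adjacent elements are equal, A's scan finds nothing
theorem pvScanPair_none {l : List Int} (h : l.IsChain (· ≠ ·)) :
    pvScanPair l = none := by
  induction l with
  | nil => rfl
  | cons a t ih =>
    match t with
    | [] => rfl
    | b :: rest =>
      rw [List.isChain_cons_cons] at h
      have hab : ¬(a == b) = true := by simpa using h.1
      simp [pvScanPair, hab, ih h.2]

-- if the prefix l ++ [x] is pair-free, the first adjacent pair of
-- l ++ x :: x :: r is exactly the two x's
theorem pvScanPair_first {l : List Int} {x : Int} {r : List Int}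
    (h : (l ++ [x]).IsChain (· ≠ ·)) :
    pvScanPair (l ++ x :: x :: r) = some (x + x, l ++ r) := by
  induction l with
  | nil => simp [pvScanPair]
  | cons a t ih =>
    match t with
    | [] =>
      have hax : ¬(a == x) = true := by simpa using h
      simp [pvScanPair, hax]
    | b :: t' =>
      obtain ⟨hab', h2'⟩ : ¬a = b ∧ (b :: (t' ++ [x])).IsChain (· ≠ ·) := by
        simpa using h
      have hab : ¬(a == b) = true := by simpa using hab'
      have hrec := ih (by simpa using h2')
      simp only [List.cons_append] at hrec ⊢
      simp [pvScanPair, hab, hrec]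

-- main bridge: A's while-loop on (reversed stack ++ filtered row) equals
-- B's stack pass on the raw row, for any pair-free stack
theorem pvBridge (xs : List Int) (stack : List Int) (pts : Int)
    (h : stack.IsChain (· ≠ ·)) :
    pvWhileMerge (stack.reverse ++ xs.filter (fun x => x != 0)) pts
      = pvStackRow stack xs pts := by
  induction xs generalizing stack pts with
  | nil =>
    have hrev : (stack.reverse).IsChain (· ≠ ·) :=
      List.isChain_reverse.mpr (h.imp fun a b hne => Ne.symm hne)
    simp only [List.filter_nil, List.append_nil]
    rw [pvWhileMerge_none (pvScanPair_none hrev)]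
    rfl
  | cons x rest ih =>
    by_cases hx : x = 0
    · subst hx
      have hrhs : pvStackRow stack (0 :: rest) pts = pvStackRow stack rest pts := by
        simp [pvStackRow]
      rw [hrhs, show List.filter (fun x => x != 0) ((0 : Int) :: rest)
            = List.filter (fun x => x != 0) rest from by simp]
      exact ih stack pts h
    · have hxf : ((x : Int) != 0) = true := by simpa using hx
      rw [List.filter_cons, if_pos hxf]
      rcases stack with _ | ⟨t, s⟩
      · have hrec := ih [x] pts (.singleton x)
        have hrhs : pvStackRow [] (x :: rest) pts = pvStackRow [x] rest pts := by
          simp [pvStackRow, hx]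
        rw [hrhs, ← hrec]
        simp
      · by_cases htx : t = x
        · subst htx
          have hchain : ((t :: s).reverse).IsChain (· ≠ ·) :=
            List.isChain_reverse.mpr (h.imp fun a b hne => Ne.symm hne)
          have hpre : (s.reverse ++ [t]).IsChain (· ≠ ·) := by simpa using hchain
          have hscan := pvScanPair_first (l := s.reverse) (x := t)
            (r := List.filter (fun x => x != 0) rest) hpre
          have hbuf : (t :: s).reverse ++ t :: List.filter (fun x => x != 0) rest
              = s.reverse ++ t :: t :: List.filter (fun x => x != 0) rest := by simp
          rw [hbuf, pvWhileMerge_some hscan, ih s (pts + (t + t)) h.tail]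
          have hrhs : pvStackRow (t :: s) (t :: rest) pts
              = pvStackRow s rest (pts + 2 * t) := by
            simp [pvStackRow, hx]
          rw [hrhs]
          congr 1
          ring
        · have h2 : (x :: t :: s).IsChain (· ≠ ·) :=
            List.isChain_cons_cons.mpr ⟨Ne.symm htx, h⟩
          have hrec := ih (x :: t :: s) pts h2
          have hl : (x :: t :: s).reverse ++ List.filter (fun x => x != 0) rest
              = (t :: s).reverse ++ x :: List.filter (fun x => x != 0) rest := by simp
          rw [← hl, hrec]
          have hbe : ¬(t == x) = true := by simpa using htx
          simp [pvStackRow, hx, hbe]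

theorem pvRow (row : List Int) (pts : Int) :
    pvWhileMerge (row.filter (fun x => x != 0)) pts = pvStackRow [] row pts := by
  simpa using pvBridge row [] pts .nil

-- ===== VERDICT (by name: the statement is the Claim_ definition above) =====
theorem points_left_spec : Claim_equal_points_left := by
  intro grid _
  unfold Spec_points_left points_left points_left_alt
  congr 1
  funext pts row
  exact pvRow row pts
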